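-- pv_equiv track=rewrite | github.com/Asrar-Ahammad/dsa-practice | 06_string/medium/beauty_of_substring.py | calculate_beauty
-- ===== SOURCE A (Python) =====
-- def calculate_beauty(s, i):
--     n = len(s)
--     freq = [0]*26
--     total = 0
--
--     for j in range(i ,n):
--         freq[ord(s[j]) - ord('a')] += 1
--         max_fres = max(f for f in freq if f > 0)
--         min_freq = min(f for f in freq if f > 0)
--         total += (max_fres- min_freq)
--
--     return total
-- ===== SOURCE B (Python) =====
-- def calculate_beauty(s, i):
--     # Same outer loop, but max/min of the nonzero frequencies are maintained
--     # incrementally via a bucket counter instead of rescanned each step.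
--     n = len(s)
--     freq = [0]*26
--     cnt = {}          # cnt[f] = number of distinct letters currently at frequency f
--     cur_max = 0
--     cur_min = 0
--     total = 0
--     for j in range(i, n):
--         idx = ord(s[j]) - ord('a')
--         f = freq[idx]
--         freq[idx] = f + 1
--         if f > 0:
--             cnt[f] -= 1
--         cnt[f + 1] = cnt.get(f + 1, 0) + 1
--         if f + 1 > cur_max:
--             cur_max = f + 1
--         if f == 0:
--             cur_min = 1
--         elif f == cur_min and cnt[f] == 0:
--             cur_min += 1
--         total += cur_max - cur_min
--     return total
-- ===== Notes on version B (the rewrite author's own statement) =====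
-- stated objective: faster
-- what changed: B replaces A's per-character rescans of the frequency table (two generator passes computing max and min of the nonzero frequencies) by incrementally maintained running max / min with a bucket counter cnt[f] = number of letters at frequency f, updated in O(1) per character.
import Mathlib
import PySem

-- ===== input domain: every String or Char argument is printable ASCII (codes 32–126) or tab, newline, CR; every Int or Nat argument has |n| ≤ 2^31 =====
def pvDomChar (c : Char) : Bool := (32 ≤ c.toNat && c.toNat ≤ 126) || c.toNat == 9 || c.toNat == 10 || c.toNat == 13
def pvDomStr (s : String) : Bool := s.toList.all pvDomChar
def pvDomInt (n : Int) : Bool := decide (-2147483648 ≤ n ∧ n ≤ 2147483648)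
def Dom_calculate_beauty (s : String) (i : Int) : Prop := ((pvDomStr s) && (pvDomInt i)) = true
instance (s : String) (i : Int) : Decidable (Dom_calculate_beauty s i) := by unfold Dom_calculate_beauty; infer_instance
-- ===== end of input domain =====

-- B replaces A's per-step rescans of the 26-entry frequency table (max/min of the
-- nonzero frequencies) by incrementally maintained running max/min with a bucket
-- counter of frequencies, updated in O(1) per character.

-- ===== PORT A =====
-- one iteration of A's loop body; state = (freq, total)
def pvStepA (cs : List Char) (st : List Int × Int) (j : Int) : List Int × Int :=
  let idx : Int := ((PySem.List.pyGetD cs j ' ').toNat : Int) - 97   -- ord(s[j]) - ord('a')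
  let freq := PySem.List.pySetD st.1 idx (PySem.List.pyGetD st.1 idx 0 + 1)
  let pos := freq.filter (fun f => decide (0 < f))
  -- the generator is nonempty here (freq was just incremented), so the `.getD 0`
  -- default (Python's ValueError) is unreachable
  let maxFres := (PySem.List.max? pos (fun x => x)).getD 0
  let minFreq := (PySem.List.min? pos (fun x => x)).getD 0
  (freq, st.2 + (maxFres - minFreq))

def calculate_beauty (s : String) (i : Int) : Int :=
  let n : Int := s.toList.length
  ((PySem.List.pyRange i n 1).foldl (pvStepA s.toList) (List.replicate 26 0, 0)).2

-- ===== PORT B =====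
-- one iteration of B's loop body; state = (freq, cnt, cur_max, cur_min, total)
def pvStepB (cs : List Char)
    (st : List Int × PySem.Dict Int Int × Int × Int × Int) (j : Int) :
    List Int × PySem.Dict Int Int × Int × Int × Int :=
  let freq := st.1
  let cnt := st.2.1
  let cmax := st.2.2.1
  let cmin := st.2.2.2.1
  let total := st.2.2.2.2
  let idx : Int := ((PySem.List.pyGetD cs j ' ').toNat : Int) - 97
  let f := PySem.List.pyGetD freq idx 0
  let freq' := PySem.List.pySetD freq idx (f + 1)
  -- cnt[f] -= 1 : whenever this line runs (0 < f) the key f is present, so the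
  -- overwrite-insert is exact
  let cnt1 := if 0 < f then cnt.insert f (cnt.getD f 0 - 1) else cnt
  let cnt2 := cnt1.insert (f + 1) (cnt1.getD (f + 1) 0 + 1)   -- cnt[f+1] = cnt.get(f+1,0)+1
  let cmax' := if cmax < f + 1 then f + 1 else cmax
  let cmin' := if f = 0 then 1
               else if f = cmin ∧ cnt2.getD f 0 = 0 then cmin + 1 else cmin
  (freq', cnt2, cmax', cmin', total + (cmax' - cmin'))

def calculate_beauty_alt (s : String) (i : Int) : Int :=
  let n : Int := s.toList.length
  ((PySem.List.pyRange i n 1).foldl (pvStepB s.toList)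
    (List.replicate 26 0, PySem.Dict.empty, 0, 0, 0)).2.2.2.2

-- ===== PRECONDITION & SPEC =====
-- Pre_ excludes exactly the inputs where A raises: i < -len(s) with a nonempty loop
-- (s[j] IndexError) and accessed characters outside codes 71..122 (freq[idx] IndexError);
-- i ≥ len(s) makes the loop empty, so any string is fine there.
def Pre_calculate_beauty (s : String) (i : Int) : Prop :=
  (s.toList.length : Int) ≤ i ∨
  (-(s.toList.length : Int) ≤ i ∧
    (s.toList.drop i.toNat).all (fun c => 71 ≤ c.toNat && c.toNat ≤ 122) = true)
instance (s : String) (i : Int) : Decidable (Pre_calculate_beauty s i) := by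
  unfold Pre_calculate_beauty; infer_instance

def pvWitness_calculate_beauty : String × Int := ("ab", 0)

def Spec_calculate_beauty (s : String) (i : Int) (out : Int) : Prop := out = calculate_beauty_alt s i
instance (s : String) (i : Int) (out : Int) : Decidable (Spec_calculate_beauty s i out) := by
  unfold Spec_calculate_beauty; infer_instance

-- ===== CLAIM =====
def Claim_equal_calculate_beauty : Prop := ∀ (s : String) (i : Int), Dom_calculate_beauty s i → Pre_calculate_beauty s i → Spec_calculate_beauty s i (calculate_beauty s i)

-- ===== LEMMAS AND PROOFS =====

-- cmax is the maximum nonzero frequency / cmin the minimum nonzero frequency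
def pvIsMaxP (F : List Int) (m : Int) : Prop := m ∈ F ∧ 0 < m ∧ ∀ y ∈ F, 0 < y → y ≤ m
def pvIsMinP (F : List Int) (m : Int) : Prop := m ∈ F ∧ 0 < m ∧ ∀ y ∈ F, 0 < y → m ≤ y

-- coupling invariant for B's extra state
def pvInv (F : List Int) (cnt : PySem.Dict Int Int) (cmax cmin : Int) : Prop :=
  F.length = 26 ∧ (∀ y ∈ F, 0 ≤ y) ∧
  (∀ k : Int, 0 < k → cnt.getD k 0 = (F.count k : Int)) ∧
  (((∀ y ∈ F, y = 0) ∧ cmax = 0 ∧ cmin = 0) ∨ (pvIsMaxP F cmax ∧ pvIsMinP F cmin))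

lemma pv_maxval {F : List Int} {m : Int} (h : pvIsMaxP F m) :
    (PySem.List.max? (F.filter (fun f => decide (0 < f))) (fun x => x)).getD 0 = m := by
  obtain ⟨hm, hm0, hub⟩ := h
  have hmem : m ∈ F.filter (fun f => decide (0 < f)) := by
    simp [List.mem_filter, hm, hm0]
  cases hq : PySem.List.max? (F.filter (fun f => decide (0 < f))) (fun x => x) with
  | none =>
    rw [PySem.List.max?_eq_none_iff] at hq
    simp [hq] at hmem
  | some M =>
    have hMmem := PySem.List.max?_mem hq
    rw [List.mem_filter] at hMmem
    have h1 : M ≤ m := hub M hMmem.1 (by simpa using hMmem.2)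
    have h2 : m ≤ M := PySem.List.max?_isMax hq m hmem
    simp; omega

lemma pv_minval {F : List Int} {m : Int} (h : pvIsMinP F m) :
    (PySem.List.min? (F.filter (fun f => decide (0 < f))) (fun x => x)).getD 0 = m := by
  obtain ⟨hm, hm0, hlb⟩ := h
  have hmem : m ∈ F.filter (fun f => decide (0 < f)) := by
    simp [List.mem_filter, hm, hm0]
  cases hq : PySem.List.min? (F.filter (fun f => decide (0 < f))) (fun x => x) with
  | none =>
    rw [PySem.List.min?_eq_none_iff] at hq
    simp [hq] at hmem
  | some M =>
    have hMmem := PySem.List.min?_mem hq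
    rw [List.mem_filter] at hMmem
    have h1 : m ≤ M := hlb M hMmem.1 (by simpa using hMmem.2)
    have h2 : M ≤ m := PySem.List.min?_isMin hq m hmem
    simp; omega

lemma pv_mem_set_of_ne {F : List Int} {p : Nat} (hp : p < F.length) {a v : Int}
    (ha : a ∈ F) (hne : a ≠ F[p]) : a ∈ F.set p v := by
  have h1 : 1 ≤ F.count a := List.one_le_count_iff.2 ha
  have h2 : F.count a ≤ (F.set p v).count a := by
    rw [List.count_set hp]
    have : (F[p] == a) = false := by simp; exact fun h => hne h.symm
    simp [this]
  exact List.count_pos_iff.1 (by omega)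

-- the accessed index is in range, giving a concrete position p < 26
lemma pv_idx26 {idx : Int} (h1 : -26 ≤ idx) (h2 : idx < 26) :
    ∃ p : Nat, p < 26 ∧ PySem.List.pyIdx? 26 idx = some p := by
  by_cases h : 0 ≤ idx
  · refine ⟨idx.toNat, by omega, ?_⟩
    simp only [PySem.List.pyIdx?, if_pos h]
    rw [if_pos]; exact_mod_cast h2
  · refine ⟨26 - (-idx).toNat, by omega, ?_⟩
    simp only [PySem.List.pyIdx?, if_neg h]
    rw [if_pos]; exact_mod_cast h1

lemma pv_pyGetD_eq {F : List Int} {idx : Int} {p : Nat} (hF : F.length = 26)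
    (hidx : PySem.List.pyIdx? 26 idx = some p) (hp : p < 26) (d : Int) :
    PySem.List.pyGetD F idx d = F[p]'(by omega) := by
  simp only [PySem.List.pyGetD, PySem.List.pyGet?, hF, hidx, Option.bind_some]
  rw [List.getElem?_eq_getElem (by omega)]
  rfl

lemma pv_pySetD_eq {F : List Int} {idx : Int} {p : Nat} (hF : F.length = 26)
    (hidx : PySem.List.pyIdx? 26 idx = some p) (v : Int) :
    PySem.List.pySetD F idx v = F.set p v := by
  simp only [PySem.List.pySetD, PySem.List.pySet?, hF, hidx, Option.map_some, Option.getD_some]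

-- count of a value after bumping position p by one
lemma pv_count_set {F : List Int} {p : Nat} (hp : p < F.length) (k : Int) :
    ((F.set p (F[p] + 1)).count k : Int)
      = (F.count k : Int) - (if F[p] = k then 1 else 0) + (if F[p] + 1 = k then 1 else 0) := by
  rw [List.count_set hp]
  by_cases hfk : F[p] = k
  · have h1 : 1 ≤ F.count k := List.one_le_count_iff.2 (hfk ▸ F.getElem_mem hp)
    have hgk : ¬ (F[p] + 1 = k) := by omega
    simp [hfk, hgk]
    omega
  · by_cases hgk : F[p] + 1 = k
    · simp [hfk, hgk, Ne.symm]
    · simp [hfk, hgk, Ne.symm]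

-- the heart: one loop step preserves the coupling invariant
lemma pv_step_inv (F : List Int) (cnt : PySem.Dict Int Int) (cmax cmin : Int)
    (p : Nat) (hp : p < F.length) (hInv : pvInv F cnt cmax cmin) :
    pvInv (F.set p (F[p] + 1))
      ((if 0 < F[p] then cnt.insert F[p] (cnt.getD F[p] 0 - 1) else cnt).insert (F[p] + 1)
        ((if 0 < F[p] then cnt.insert F[p] (cnt.getD F[p] 0 - 1) else cnt).getD (F[p] + 1) 0 + 1))
      (if cmax < F[p] + 1 then F[p] + 1 else cmax)
      (if F[p] = 0 then 1
       else if F[p] = cmin ∧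
          ((if 0 < F[p] then cnt.insert F[p] (cnt.getD F[p] 0 - 1) else cnt).insert (F[p] + 1)
            ((if 0 < F[p] then cnt.insert F[p] (cnt.getD F[p] 0 - 1) else cnt).getD (F[p] + 1) 0 + 1)).getD
            (F[p]) 0 = 0
       then cmin + 1 else cmin) := by
  obtain ⟨hF, hnn, hcnt, hext⟩ := hInv
  set f := F[p] with hf
  have hfmem : f ∈ F := F.getElem_mem hp
  have hf0 : 0 ≤ f := hnn f hfmem
  set cnt1 := if 0 < f then cnt.insert f (cnt.getD f 0 - 1) else cnt with hcnt1
  set cnt2 := cnt1.insert (f + 1) (cnt1.getD (f + 1) 0 + 1) with hcnt2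
  set G := F.set p (f + 1) with hG
  have hpG : p < G.length := by rw [hG, List.length_set]; exact hp
  have hGp : G[p] = f + 1 := List.getElem_set_self hpG
  have hGmem : f + 1 ∈ G := hGp ▸ G.getElem_mem hpG
  -- count bookkeeping
  have hcnt1D : ∀ k : Int, 0 < k → cnt1.getD k 0 =
      (F.count k : Int) - (if f = k then 1 else 0) := by
    intro k hk
    rw [hcnt1]
    by_cases hpos : 0 < f
    · rw [if_pos hpos, PySem.Dict.getD_insert]
      by_cases hfk : k = f
      · simp [hfk, hcnt f hpos]
      · have hne : ¬ (f = k) := fun h => hfk h.symm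
        rw [if_neg hfk, if_neg hne, hcnt k hk]
        omega
    · rw [if_neg hpos]
      have hfk : ¬ (f = k) := by omega
      simp [hfk, hcnt k hk]
  have hcnt2D : ∀ k : Int, 0 < k → cnt2.getD k 0 = (G.count k : Int) := by
    intro k hk
    rw [hcnt2, PySem.Dict.getD_insert, hG, pv_count_set hp, ← hf]
    by_cases hgk : k = f + 1
    · rw [if_pos hgk, hcnt1D (f+1) (by omega)]
      have : ¬ (f = f + 1) := by omega
      simp [hgk, this]
    · rw [if_neg hgk, hcnt1D k hk]
      have : ¬ (f + 1 = k) := fun h => hgk h.symm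
      simp [this]
  refine ⟨by rw [hG, List.length_set]; exact hF, ?_, hcnt2D, ?_⟩
  · intro y hy
    rcases List.mem_or_eq_of_mem_set (hG ▸ hy) with h | h
    · exact hnn y h
    · omega
  -- extrema
  right
  rcases hext with ⟨hzero, hcmax, hcmin⟩ | ⟨⟨hmaxMem, hmax0, hmaxUb⟩, ⟨hminMem, hmin0, hminLb⟩⟩
  · -- F all zero: f = 0, new max = new min = 1
    have hfz : f = 0 := hzero f hfmem
    have hone : (1:Int) ∈ G := by simpa [hfz] using hGmem
    have e1 : (if cmax < f + 1 then f + 1 else cmax) = 1 := by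
      rw [hcmax, hfz]; norm_num
    have e2 : (if f = 0 then (1:Int)
        else if f = cmin ∧ cnt2.getD f 0 = 0 then cmin + 1 else cmin) = 1 := if_pos hfz
    rw [e1, e2]
    refine ⟨⟨hone, by norm_num, ?_⟩, ⟨hone, by norm_num, ?_⟩⟩
    · intro y hy hy0
      rcases List.mem_or_eq_of_mem_set (hG ▸ hy) with h | h
      · have := hzero y h; omega
      · omega
    · intro y hy hy0
      omega
  · -- F has a positive entry
    have hGmemOld : ∀ a : Int, a ∈ F → a ≠ f → a ∈ G := fun a ha hne =>
      pv_mem_set_of_ne hp ha hne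
    constructor
    · -- max
      by_cases hlt : cmax < f + 1
      · rw [if_pos hlt]
        refine ⟨hGmem, by omega, ?_⟩
        intro y hy hy0
        rcases List.mem_or_eq_of_mem_set (hG ▸ hy) with h | h
        · have := hmaxUb y h hy0; omega
        · omega
      · rw [if_neg hlt]
        refine ⟨hGmemOld cmax hmaxMem (by omega), hmax0, ?_⟩
        intro y hy hy0
        rcases List.mem_or_eq_of_mem_set (hG ▸ hy) with h | h
        · exact hmaxUb y h hy0
        · omega
    · -- min
      by_cases hfz : f = 0
      · rw [if_pos hfz]
        have hone : (1:Int) ∈ G := by simpa [hfz] using hGmem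
        exact ⟨hone, by norm_num, fun y hy hy0 => by omega⟩
      · rw [if_neg hfz]
        have hfpos : 0 < f := by omega
        have hfcmin : cmin ≤ f := hminLb f hfmem hfpos
        have hc2f : cnt2.getD f 0 = (G.count f : Int) := hcnt2D f hfpos
        by_cases hcond : f = cmin ∧ cnt2.getD f 0 = 0
        · rw [if_pos hcond]
          obtain ⟨hfc, hz⟩ := hcond
          have hGf : f ∉ G := by
            rw [hc2f] at hz
            exact List.count_eq_zero.1 (by omega)
          refine ⟨by rw [hfc] at hGmem; exact hGmem, by omega, ?_⟩
          intro y hy hy0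
          rcases List.mem_or_eq_of_mem_set (hG ▸ hy) with h | h
          · have h1 := hminLb y h hy0
            have h2 : y ≠ f := fun hh => hGf (hh ▸ hy)
            omega
          · omega
        · rw [if_neg hcond]
          have hminG : cmin ∈ G := by
            by_cases hfc : f = cmin
            · -- the bucket at cmin did not empty: another occurrence survives
              have hz : cnt2.getD f 0 ≠ 0 := fun hz => hcond ⟨hfc, hz⟩
              rw [hc2f] at hz
              have : 0 < G.count cmin := by rw [← hfc]; omega
              exact List.count_pos_iff.1 this
            · exact hGmemOld cmin hminMem (fun h => hfc h.symm)
          refine ⟨hminG, hmin0, ?_⟩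
          intro y hy hy0
          rcases List.mem_or_eq_of_mem_set (hG ▸ hy) with h | h
          · exact hminLb y h hy0
          · omega

-- one full loop step: A and B produce the same freq and total, invariant preserved
lemma pv_step_eq (cs : List Char) (j : Int) (F : List Int) (cnt : PySem.Dict Int Int)
    (cmax cmin total : Int)
    (_hrange : PySem.Raise.InRange cs.length j)
    (h71 : 71 ≤ (PySem.List.pyGetD cs j ' ').toNat)
    (h122 : (PySem.List.pyGetD cs j ' ').toNat ≤ 122)
    (hInv : pvInv F cnt cmax cmin) :
    ∃ F' cnt' cmax' cmin' t',
      pvStepA cs (F, total) j = (F', t') ∧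
      pvStepB cs (F, cnt, cmax, cmin, total) j = (F', cnt', cmax', cmin', t') ∧
      pvInv F' cnt' cmax' cmin' := by
  have hF : F.length = 26 := hInv.1
  set idx : Int := ((PySem.List.pyGetD cs j ' ').toNat : Int) - 97 with hidxdef
  obtain ⟨p, hp, hidx⟩ := pv_idx26 (idx := idx) (by omega) (by omega)
  have hp' : p < F.length := by omega
  have hget := pv_pyGetD_eq hF hidx hp (0 : Int)
  have hset := pv_pySetD_eq hF hidx (F[p]'hp' + 1)
  set f := F[p]'hp' with hf
  set G := F.set p (f + 1) with hG
  set cnt1 := if 0 < f then cnt.insert f (cnt.getD f 0 - 1) else cnt with hcnt1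
  set cnt2 := cnt1.insert (f + 1) (cnt1.getD (f + 1) 0 + 1) with hcnt2
  set cmax' := if cmax < f + 1 then f + 1 else cmax with hcmax'
  set cmin' := if f = 0 then 1
               else if f = cmin ∧ cnt2.getD f 0 = 0 then cmin + 1 else cmin with hcmin'
  have hInvG : pvInv G cnt2 cmax' cmin' := pv_step_inv F cnt cmax cmin p hp' hInv
  have hGpos : pvIsMaxP G cmax' ∧ pvIsMinP G cmin' := by
    rcases hInvG.2.2.2 with ⟨hz, _, _⟩ | h
    · exfalso
      have hpG : p < G.length := by rw [hG, List.length_set]; exact hp'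
      have : G[p] = f + 1 := List.getElem_set_self hpG
      have hmem : f + 1 ∈ G := this ▸ G.getElem_mem hpG
      have hf0 : 0 ≤ f := hInv.2.1 f (F.getElem_mem hp')
      have := hz (f + 1) hmem
      omega
    · exact h
  refine ⟨G, cnt2, cmax', cmin', total + (cmax' - cmin'), ?_, ?_, hInvG⟩
  · show pvStepA cs (F, total) j = (G, total + (cmax' - cmin'))
    simp only [pvStepA, ← hidxdef, hget, hset]
    rw [pv_maxval hGpos.1, pv_minval hGpos.2]
  · show pvStepB cs (F, cnt, cmax, cmin, total) j = (G, cnt2, cmax', cmin', total + (cmax' - cmin'))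
    simp only [pvStepB, ← hidxdef, hget, hset, ← hcnt1, ← hcnt2, ← hcmax', ← hcmin']

lemma pv_fold_eq (cs : List Char) (J : List Int)
    (hJ : ∀ j ∈ J, PySem.Raise.InRange cs.length j ∧
          71 ≤ (PySem.List.pyGetD cs j ' ').toNat ∧ (PySem.List.pyGetD cs j ' ').toNat ≤ 122) :
    ∀ F cnt cmax cmin (total : Int), pvInv F cnt cmax cmin →
      (J.foldl (pvStepA cs) (F, total)).2
        = (J.foldl (pvStepB cs) (F, cnt, cmax, cmin, total)).2.2.2.2 := by
  induction J with
  | nil => intro F cnt cmax cmin total _; rfl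
  | cons j J ih =>
    intro F cnt cmax cmin total hInv
    obtain ⟨hr, h71, h122⟩ := hJ j (List.mem_cons_self)
    obtain ⟨F', cnt', cmax', cmin', t', hA, hB, hInv'⟩ :=
      pv_step_eq cs j F cnt cmax cmin total hr h71 h122 hInv
    rw [List.foldl_cons, List.foldl_cons, hA, hB]
    exact ih (fun k hk => hJ k (List.mem_cons_of_mem _ hk)) F' cnt' cmax' cmin' t' hInv'

lemma pv_inv_init : pvInv (List.replicate 26 0) PySem.Dict.empty 0 0 := by
  refine ⟨by simp, ?_, ?_, Or.inl ⟨?_, rfl, rfl⟩⟩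
  · intro y hy; rw [List.eq_of_mem_replicate hy]
  · intro k hk
    rw [PySem.Dict.getD_empty]
    have : k ∉ List.replicate 26 (0:Int) := by
      intro h; have := List.eq_of_mem_replicate h; omega
    rw [List.count_eq_zero.2 this]; rfl
  · intro y hy; exact List.eq_of_mem_replicate hy

-- ===== VERDICT =====
theorem calculate_beauty_spec : Claim_equal_calculate_beauty := by
  intro s i _ hPre
  unfold Spec_calculate_beauty calculate_beauty calculate_beauty_alt
  show ((PySem.List.pyRange i (s.toList.length : Int) 1).foldl (pvStepA s.toList)
          (List.replicate 26 0, 0)).2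
      = ((PySem.List.pyRange i (s.toList.length : Int) 1).foldl (pvStepB s.toList)
          (List.replicate 26 0, PySem.Dict.empty, 0, 0, 0)).2.2.2.2
  rcases hPre with h | ⟨hlow, hchars⟩
  · rw [PySem.List.pyRange_one_eq_nil h]
    rfl
  · apply pv_fold_eq _ _ _ _ _ _ _ _ pv_inv_init
    intro j hj
    rw [PySem.List.mem_pyRange_one] at hj
    have hr : PySem.Raise.InRange s.toList.length j := ⟨by omega, by omega⟩
    refine ⟨hr, ?_⟩
    have hmem : PySem.List.pyGetD s.toList j ' ' ∈ s.toList.drop i.toNat := by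
      by_cases hi : 0 ≤ i
      · have hj0 : 0 ≤ j := by omega
        rw [PySem.List.pyGetD_eq_getElem s.toList ' ' hj0 (by omega)]
        have hij : i.toNat ≤ j.toNat := by omega
        have hlen : j.toNat - i.toNat < (s.toList.drop i.toNat).length := by
          rw [List.length_drop]; omega
        have : (s.toList.drop i.toNat)[j.toNat - i.toNat] = s.toList[j.toNat]'(by omega) := by
          rw [List.getElem_drop]; congr 1; omega
        rw [← this]
        exact List.getElem_mem hlen
      · have : i.toNat = 0 := by omega
        rw [this, List.drop_zero]
        exact PySem.List.pyGetD_mem s.toList ' ' hr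
    simpa using List.all_eq_true.mp hchars _ hmem
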